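-- pv_equiv track=rewrite | github.com/DmitriyReztsov/homework-repository | homework07/hw3.py | check_win_board
-- ===== SOURCE A (Python) =====
-- from typing import List
--
-- def check_win_board(result: List) -> str:
--     return_result = ""
--     for value in result:
--         if "win" in value:
--             return value
--         if "unfinished!" in value:
--             return_result = "unfinished!"
--         if "draw!" in value and "unfinished!" not in return_result:
--             return_result = "draw!"
--     return return_result
-- ===== SOURCE B (Python) =====
-- def check_win_board(result):
--     win = next((v for v in result if "win" in v), None)
--     if win is not None:
--         return win
--     if any("unfinished!" in v for v in result):
--         return "unfinished!"
--     if any("draw!" in v for v in result):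
--         return "draw!"
--     return ""
-- ===== Notes on version B (the rewrite author's own statement) =====
-- stated objective: simpler
-- what changed: Replaces the single stateful accumulator loop by short declarative scans: first win string (next), else any unfinished, else any draw, else empty.
import Mathlib
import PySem

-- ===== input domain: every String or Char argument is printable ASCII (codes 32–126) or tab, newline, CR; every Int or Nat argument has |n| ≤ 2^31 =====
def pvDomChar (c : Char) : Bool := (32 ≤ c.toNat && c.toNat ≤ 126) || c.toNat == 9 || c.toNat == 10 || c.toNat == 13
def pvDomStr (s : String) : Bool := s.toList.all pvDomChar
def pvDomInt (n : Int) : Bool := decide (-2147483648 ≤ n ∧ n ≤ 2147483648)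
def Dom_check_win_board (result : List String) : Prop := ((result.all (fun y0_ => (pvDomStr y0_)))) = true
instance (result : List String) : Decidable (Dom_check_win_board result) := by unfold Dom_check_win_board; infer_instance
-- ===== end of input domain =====

-- B replaces A's single accumulator loop by short declarative scans (first win, else any unfinished, else any draw); same return value, proved equal.


-- ===== PORT A =====
-- A's loop with the mutable accumulator `return_result`, as structural recursion over the list.
def check_win_board_go (rest : List String) (return_result : String) : String :=
  match rest with
  | [] => return_result
  | value :: rest =>
    if PySem.Str.isIn "win" value then value
    else
      let r1 := if PySem.Str.isIn "unfinished!" value then "unfinished!" else return_result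
      let r2 := if PySem.Str.isIn "draw!" value && !(PySem.Str.isIn "unfinished!" r1) then "draw!" else r1
      check_win_board_go rest r2

def check_win_board (result : List String) : String :=
  check_win_board_go result ""

-- ===== PORT B =====
def check_win_board_alt (result : List String) : String :=
  match result.find? (fun v => PySem.Str.isIn "win" v) with
  | some win => win
  | none =>
    if result.any (fun v => PySem.Str.isIn "unfinished!" v) then "unfinished!"
    else if result.any (fun v => PySem.Str.isIn "draw!" v) then "draw!"
    else ""

-- ===== PRECONDITION & SPEC =====
def Spec_check_win_board (result : List String) (out : String) : Prop := out = check_win_board_alt result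
instance (result : List String) (out : String) : Decidable (Spec_check_win_board result out) := by unfold Spec_check_win_board; infer_instance

-- ===== CLAIM (what is proved, stated in full; the proofs are below) =====
def Claim_equal_check_win_board : Prop := ∀ (result : List String), Dom_check_win_board result → Spec_check_win_board result (check_win_board result)

-- ===== LEMMAS AND PROOFS =====

-- The accumulator only ever holds "", "draw!" or "unfinished!"; on those values A's loop computes B's priority scheme.
theorem check_win_board_go_spec (rest : List String) (acc : String)
    (h : acc = "" ∨ acc = "draw!" ∨ acc = "unfinished!") :
    check_win_board_go rest acc =
      match rest.find? (fun v => PySem.Str.isIn "win" v) with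
      | some win => win
      | none =>
        if acc = "unfinished!" ∨ (rest.any (fun v => PySem.Str.isIn "unfinished!" v)) = true then "unfinished!"
        else if acc = "draw!" ∨ (rest.any (fun v => PySem.Str.isIn "draw!" v)) = true then "draw!"
        else acc := by
  induction rest generalizing acc with
  | nil =>
    simp only [check_win_board_go, List.find?_nil, List.any_nil]
    rcases h with h | h | h <;> subst h <;> simp
  | cons v rest ih =>
    have e1 : PySem.Str.isIn "unfinished!" "unfinished!" = true := by decide
    have e2 : PySem.Str.isIn "unfinished!" "draw!" = false := by decide
    have e3 : PySem.Str.isIn "unfinished!" "" = false := by decide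
    by_cases hw : PySem.Str.isIn "win" v = true
    · rw [List.find?_cons_of_pos hw]
      simp only [check_win_board_go, hw, if_true]
    · rw [List.find?_cons_of_neg hw, List.any_cons, List.any_cons]
      simp only [check_win_board_go, hw, if_false, Bool.false_eq_true]
      rcases h with h | h | h <;> subst h <;>
        by_cases hu : PySem.Str.isIn "unfinished!" v = true <;>
        by_cases hd : PySem.Str.isIn "draw!" v = true <;>
        simp only [hu, hd, e1, e2, e3, if_true, if_false, Bool.not_true, Bool.not_false,
          Bool.and_true, Bool.and_false, Bool.false_eq_true] <;>
        rw [ih _ (by simp)] <;>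
        cases hf : rest.find? (fun v => PySem.Str.isIn "win" v) <;> simp

-- ===== VERDICT (by name: the statement is the Claim_ definition above) =====
theorem check_win_board_spec : Claim_equal_check_win_board := by
  intro result _
  unfold Spec_check_win_board check_win_board check_win_board_alt
  rw [check_win_board_go_spec result "" (Or.inl rfl)]
  cases h : result.find? (fun v => PySem.Str.isIn "win" v) <;> simp
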